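-- pv_equiv track=rewrite | github.com/ggirelli/potpourri | cosmic-census-fish-oligos/characterize_oligos.py | has_hp
-- ===== SOURCE A (Python) =====
-- def has_hp(seq, k):
-- 	''''''
-- 	c = 0
-- 	for i in range(len(seq) - 1):
-- 		if seq[i] == seq[i + 1]:
-- 			c += 1
-- 		else:
-- 			c = 0
--
-- 		if c >= k:
-- 			return(True)
-- 	return(False)
-- ===== SOURCE B (Python) =====
-- def has_hp(seq, k):
--     n = len(seq)
--     if n < 2:
--         return False
--     runs = []
--     start = 0
--     for i in range(1, n):
--         if seq[i] != seq[i - 1]: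
--             runs.append(i - start)
--             start = i
--     runs.append(n - start)
--     return max(runs) - 1 >= k
-- ===== Notes on version B (the rewrite author's own statement) =====
-- stated objective: simpler
-- what changed: B first decomposes the sequence into maximal runs of equal elements and reduces with max(runs)-1 >= k, instead of threading a running adjacent-equal counter with an early return inside the loop.
import Mathlib
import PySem

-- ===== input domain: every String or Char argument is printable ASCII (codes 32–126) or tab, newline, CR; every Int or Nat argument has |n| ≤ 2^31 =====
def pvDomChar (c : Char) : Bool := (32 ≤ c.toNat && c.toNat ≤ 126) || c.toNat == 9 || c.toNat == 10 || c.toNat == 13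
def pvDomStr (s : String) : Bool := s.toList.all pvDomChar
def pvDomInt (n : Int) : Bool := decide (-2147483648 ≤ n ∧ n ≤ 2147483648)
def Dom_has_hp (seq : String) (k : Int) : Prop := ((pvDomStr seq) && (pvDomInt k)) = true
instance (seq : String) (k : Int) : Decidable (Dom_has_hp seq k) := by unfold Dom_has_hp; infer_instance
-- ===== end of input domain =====

-- B decomposes the sequence into maximal runs of equal characters and reduces with max; A threads a running counter with early exit. Equivalence proved on all inputs.

-- ===== PORT A =====
-- A's loop over i in range(len(seq)-1) comparing seq[i] with seq[i+1] with running counter c and early return,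
-- transcribed as a pairwise traversal carrying the previous character and the counter c.
def has_hp_go (k c : Int) (prev : Char) (rest : List Char) : Bool :=
  match rest with
  | [] => false
  | b :: t =>
      let c' := if prev == b then c + 1 else 0
      if c' ≥ k then true else has_hp_go k c' b t

def has_hp (seq : String) (k : Int) : Bool :=
  match seq.toList with
  | [] => false
  | a :: t => has_hp_go k 0 a t

-- ===== PORT B =====
-- run-length decomposition: runsFrom prev cur cs returns the lengths of the maximal runs
-- of the sequence prev-repeated-cur-times ++ cs (cur = length of the run currently open).
def runsFrom (prev : Char) (cur : Nat) (cs : List Char) : List Nat :=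
  match cs with
  | [] => [cur]
  | b :: t => if b ≠ prev then cur :: runsFrom b 1 t else runsFrom b (cur + 1) t

def has_hp_alt (seq : String) (k : Int) : Bool :=
  match seq.toList with
  | [] => false
  | [_] => false
  | a :: t => decide ((((runsFrom a 1 t).foldl Nat.max 0 : Nat) : Int) - 1 ≥ k)

-- ===== PRECONDITION & SPEC =====
def Spec_has_hp (seq : String) (k : Int) (out : Bool) : Prop := out = has_hp_alt seq k
instance (seq : String) (k : Int) (out : Bool) : Decidable (Spec_has_hp seq k out) := by unfold Spec_has_hp; infer_instance

-- ===== CLAIM (what is proved, stated in full; the proofs are below) =====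
def Claim_equal_has_hp : Prop := ∀ (seq : String) (k : Int), Dom_has_hp seq k → Spec_has_hp seq k (has_hp seq k)

-- ===== LEMMAS AND PROOFS =====

theorem foldl_max_eq (a : Nat) (l : List Nat) : l.foldl Nat.max a = Nat.max a (l.foldl Nat.max 0) := by
  induction l generalizing a with
  | nil => simp
  | cons x t ih =>
      simp only [List.foldl]
      rw [ih (Nat.max a x), ih (Nat.max 0 x)]
      simp [Nat.max_assoc]

theorem runs_max_ge (prev : Char) (cur : Nat) (cs : List Char) :
    cur ≤ (runsFrom prev cur cs).foldl Nat.max 0 := by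
  induction cs generalizing prev cur with
  | nil => simp [runsFrom]
  | cons b t ih =>
      simp only [runsFrom]
      split
      · simp only [List.foldl]
        rw [foldl_max_eq]
        simp
      · have := ih b (cur + 1)
        omega

theorem key (k : Int) (hk : 0 < k) :
    ∀ (t : List Char) (prev : Char) (c : Nat), (c : Int) < k →
      has_hp_go k (c : Int) prev t =
        decide ((((runsFrom prev (c + 1) t).foldl Nat.max 0 : Nat) : Int) - 1 ≥ k) := by
  intro t
  induction t with
  | nil =>
      intro prev c hc
      simp only [has_hp_go, runsFrom, List.foldl]
      symm
      simp only [decide_eq_false_iff_not]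
      push_cast
      omega
  | cons b t ih =>
      intro prev c hc
      by_cases hpe : prev = b
      · subst hpe
        simp only [has_hp_go, runsFrom, BEq.rfl, if_true, ne_eq, not_true_eq_false, if_false]
        by_cases hck : ((c : Int) + 1 ≥ k)
        · rw [if_pos hck]
          have hM := runs_max_ge prev (c + 1 + 1) t
          symm
          simp only [decide_eq_true_eq]
          omega
        · rw [if_neg hck]
          have hc1 : ((c + 1 : Nat) : Int) < k := by push_cast; omega
          have h := ih prev (c + 1) hc1
          push_cast at h ⊢
          exact h
      · have hbp : b ≠ prev := fun h => hpe h.symm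
        have h0k : ¬ ((0 : Int) ≥ k) := by omega
        simp only [has_hp_go, runsFrom, beq_iff_eq, hpe, if_false, h0k, ne_eq, hbp,
          not_false_eq_true, if_true, List.foldl, Nat.zero_max]
        rw [foldl_max_eq]
        have h := ih b 0 (by exact_mod_cast hk)
        norm_num at h
        rw [h]
        simp only [decide_eq_decide]
        push_cast
        omega

-- ===== VERDICT (by name: the statement is the Claim_ definition above) =====
theorem has_hp_spec : Claim_equal_has_hp := by
  intro seq k _
  unfold Spec_has_hp has_hp has_hp_alt
  match hs : seq.toList with
  | [] => rfl
  | [a] => simp [has_hp_go]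
  | a :: b :: t =>
      by_cases hk : 0 < k
      · show has_hp_go k 0 a (b :: t) =
          decide ((((runsFrom a 1 (b :: t)).foldl Nat.max 0 : Nat) : Int) - 1 ≥ k)
        have h := key k hk (b :: t) a 0 (by exact_mod_cast hk)
        simpa using h
      · -- k ≤ 0: A returns true at the first comparison; B: the maximal run has length ≥ 1, so max - 1 ≥ 0 ≥ k
        have hM := runs_max_ge a 1 (b :: t)
        simp only [has_hp_go]
        have h1 : ((if a == b then (0 : Int) + 1 else 0) ≥ k) := by split <;> omega
        rw [if_pos h1]
        symm
        simp only [decide_eq_true_eq]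
        omega
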